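-- pv_equiv track=rewrite | github.com/TomBriar/ECC | steg.py | StrToMsg
-- ===== SOURCE A (Python) =====
-- def StrToMsg(msg):
-- 	size = len(msg)**2
-- 	result = []
-- 	for i in msg:
-- 		string = str(int(bin(ord(i))[2:]))
-- 		for ii in range(0, 8-len(string)):
-- 			string = "0"+string
-- 		for ii in range(0, len(string)):
-- 			result.append(int(string[ii:ii+1]))
-- 	# assert(len(result) <= size)#Message must not be larger than target message length
-- 	for i in range(0, size-len(result)):
-- 		result.append(0)
-- 	return result
-- ===== SOURCE B (Python) =====
-- def StrToMsg(msg):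
--     data = msg.encode('latin-1')
--     body = format(int.from_bytes(data, 'big'), '0%db' % (8 * len(data))) if data else ''
--     return [int(b) for b in body.ljust(len(msg) ** 2, '0')]
-- ===== Notes on version B (the rewrite author's own statement) =====
-- stated objective: simpler
-- what changed: Instead of A's per-character loops (bin()/int()/str() round-trips, a leading-zero prepend loop and a per-index slicing loop), B encodes the whole message to bytes, reads them as ONE big integer with int.from_bytes, formats that integer once as a zero-padded binary string and left-justifies it with '0' to len(msg)**2.
import Mathlib
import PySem

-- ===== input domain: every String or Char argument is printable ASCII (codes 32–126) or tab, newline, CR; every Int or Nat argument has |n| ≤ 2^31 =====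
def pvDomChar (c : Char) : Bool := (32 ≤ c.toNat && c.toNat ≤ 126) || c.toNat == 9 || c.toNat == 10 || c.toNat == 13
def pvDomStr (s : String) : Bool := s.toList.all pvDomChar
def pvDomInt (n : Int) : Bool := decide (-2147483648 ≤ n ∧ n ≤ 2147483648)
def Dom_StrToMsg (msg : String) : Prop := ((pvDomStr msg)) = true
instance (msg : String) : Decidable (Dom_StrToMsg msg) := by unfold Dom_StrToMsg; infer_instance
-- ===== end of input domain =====

-- B replaces A's per-character bin()/str() loops by one whole-message computation:
-- encode the string to bytes, read them as a single big integer, format that integer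
-- once as a zero-padded binary string, and left-justify with '0' to len(msg)**2.
-- Objective: simpler (no per-character bit loops); same asymptotic cost.
-- Note: B's encode('latin-1') raises for code points ≥ 256; all of Dom is ASCII.

-- ===== PORT A =====
def StrToMsg (msg : String) : List Int :=
  -- size = len(msg)**2
  let size : Int := (msg.length : Int) ^ 2
  -- result = [];  for i in msg: ...
  let result : List Int :=
    msg.toList.foldl (fun result i =>
      -- string = str(int(bin(ord(i))[2:]))  (bin(n)[2:] = Nat.toDigits 2 n; int() never
      -- fails here since bin always yields at least one digit, so .getD 0 is unreachable)
      let string : List Char :=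
        PySem.Int.toChars ((PySem.Int.ofChars? (Nat.toDigits 2 i.toNat)).getD 0)
      -- for ii in range(0, 8-len(string)): string = "0"+string
      let string : List Char :=
        (PySem.List.pyRange 0 (8 - (string.length : Int)) 1).foldl
          (fun string _ => '0' :: string) string
      -- for ii in range(0, len(string)): result.append(int(string[ii:ii+1]))
      (PySem.List.pyRange 0 (string.length : Int) 1).foldl
        (fun result ii =>
          result ++
            [(PySem.Int.ofChars? (PySem.List.slice string (some ii) (some (ii + 1)))).getD 0])
        result) []
  -- for i in range(0, size-len(result)): result.append(0)
  result ++ List.replicate (size - (result.length : Int)).toNat 0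

-- ===== PORT B =====
-- bin(n)[2:] i.e. the digits of format(n, 'b'): MSB-first binary digits, hand-ported
-- (exact for n ≥ 0: at least one digit, no leading zeros for n ≥ 1)
def pvBinStr (n : Nat) : List Char :=
  if _h : n < 2 then [if n % 2 = 1 then '1' else '0']
  else pvBinStr (n / 2) ++ [if n % 2 = 1 then '1' else '0']
  decreasing_by exact Nat.div_lt_self (by omega) (by omega)

def StrToMsg_alt (msg : String) : List Int :=
  -- data = msg.encode('latin-1')  (exact for code points < 256 — all of Dom)
  let data : List Nat := msg.toList.map Char.toNat
  -- body = format(int.from_bytes(data, 'big'), '0%db' % (8*len(data))) if data else ''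
  -- (format(n, '0kb') hand-ported as: binary digits of n left-padded with '0' to width k)
  let body : List Char :=
    if data = [] then []
    else
      let bin := pvBinStr (data.foldl (fun a b => 256 * a + b) 0)
      List.replicate (8 * data.length - bin.length) '0' ++ bin
  -- [int(b) for b in body.ljust(len(msg)**2, '0')]
  (body ++ List.replicate (msg.length ^ 2 - body.length) '0').map
    (fun b => (PySem.Int.ofChars? [b]).getD 0)

-- ===== PRECONDITION & SPEC =====
def Spec_StrToMsg (msg : String) (out : List Int) : Prop := out = StrToMsg_alt msg
instance (msg : String) (out : List Int) : Decidable (Spec_StrToMsg msg out) := by unfold Spec_StrToMsg; infer_instance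

-- ===== CLAIM (what is proved, stated in full; the proofs are below) =====
def Claim_equal_StrToMsg : Prop := ∀ (msg : String), Dom_StrToMsg msg → Spec_StrToMsg msg (StrToMsg msg)

-- ===== LEMMAS AND PROOFS =====

-- the list A's inner loops contribute for one character of code point n
def pvGA (n : Nat) : List Int :=
  let string : List Char :=
    PySem.Int.toChars ((PySem.Int.ofChars? (Nat.toDigits 2 n)).getD 0)
  let string : List Char :=
    (PySem.List.pyRange 0 (8 - (string.length : Int)) 1).foldl
      (fun string _ => '0' :: string) string
  (PySem.List.pyRange 0 (string.length : Int) 1).map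
    (fun ii =>
      (PySem.Int.ofChars? (PySem.List.slice string (some ii) (some (ii + 1)))).getD 0)

-- big-endian w-bit window of n
def pvBits : Nat → Nat → List Int
  | 0, _ => []
  | w + 1, n => pvBits w (n / 2) ++ [((n % 2 : Nat) : Int)]

-- parse of one digit character, as B's inner map does it
def pvDigit (c : Char) : Int := (PySem.Int.ofChars? [c]).getD 0

lemma pvBits_length (w n : Nat) : (pvBits w n).length = w := by
  induction w generalizing n with
  | zero => rfl
  | succ w ih => simp [pvBits, ih]

set_option maxRecDepth 100000 in
lemma pvG_eq : ∀ n < 127, pvGA n = pvBits 8 n := by decide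

lemma charCode_lt (c : Char) (h : pvDomChar c = true) : c.toNat < 127 := by
  simp [pvDomChar] at h; omega

lemma bodyA_eq :
    (fun (result : List Int) (i : Char) =>
      let string : List Char :=
        PySem.Int.toChars ((PySem.Int.ofChars? (Nat.toDigits 2 i.toNat)).getD 0)
      let string : List Char :=
        (PySem.List.pyRange 0 (8 - (string.length : Int)) 1).foldl
          (fun string _ => '0' :: string) string
      (PySem.List.pyRange 0 (string.length : Int) 1).foldl
        (fun result ii =>
          result ++
            [(PySem.Int.ofChars? (PySem.List.slice string (some ii) (some (ii + 1)))).getD 0])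
        result)
    = (fun (result : List Int) (i : Char) => result ++ pvGA i.toNat) := by
  funext result i
  simp only [PySem.List.foldl_append_singleton_eq_map, pvGA]

-- chunk lemma: appending k low bits
lemma pvBits_chunk (k : Nat) : ∀ w N b, b < 2 ^ k →
    pvBits (w + k) (2 ^ k * N + b) = pvBits w N ++ pvBits k b := by
  induction k with
  | zero =>
    intro w N b hb
    have hb0 : b = 0 := by omega
    subst hb0
    simp [pvBits]
  | succ k ih =>
    intro w N b hb
    obtain ⟨m, hm⟩ : ∃ m, 2 ^ k * N = m := ⟨_, rfl⟩
    have hkey : 2 ^ (k + 1) * N = 2 * m := by rw [← hm]; ring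
    have h2 : (2:Nat) ^ (k + 1) = 2 * 2 ^ k := by ring
    have hdiv : (2 ^ (k + 1) * N + b) / 2 = m + b / 2 := by rw [hkey]; omega
    have hmod : (2 ^ (k + 1) * N + b) % 2 = b % 2 := by rw [hkey]; omega
    have hb2 : b / 2 < 2 ^ k := by rw [h2] at hb; omega
    have hih := ih w N (b / 2) hb2
    rw [hm] at hih
    have hw : w + (k + 1) = (w + k) + 1 := by omega
    rw [hw]
    show pvBits (w + k) ((2 ^ (k + 1) * N + b) / 2) ++ [(((2 ^ (k + 1) * N + b) % 2 : Nat) : Int)]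
        = pvBits w N ++ pvBits (k + 1) b
    rw [hdiv, hmod, hih]
    simp [pvBits]

lemma pvBits_zero (k : Nat) : pvBits k 0 = List.replicate k (0 : Int) := by
  induction k with
  | zero => rfl
  | succ k ih => simp [pvBits, ih, List.replicate_succ']

lemma pvBits_pad (k w n : Nat) (h : n < 2 ^ w) :
    pvBits (k + w) n = List.replicate k (0 : Int) ++ pvBits w n := by
  have := pvBits_chunk w k 0 n h
  simpa [pvBits_zero] using this

lemma pvBinStr_lt (n : Nat) : n < 2 ^ (pvBinStr n).length := by
  induction n using pvBinStr.induct with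
  | case1 n h => unfold pvBinStr; simp [h]
  | case2 n h ih =>
    unfold pvBinStr
    simp only [h, dite_false, List.length_append, List.length_cons, List.length_nil]
    have h2 : (2:Nat) ^ ((pvBinStr (n / 2)).length + 0 + 1) = 2 * 2 ^ (pvBinStr (n / 2)).length := by ring
    rw [h2]; omega

lemma pvBinStr_le (n w : Nat) (h : n < 2 ^ w) (hw : 1 ≤ w) : (pvBinStr n).length ≤ w := by
  induction n using pvBinStr.induct generalizing w with
  | case1 n hn => unfold pvBinStr; simp [hn]; omega
  | case2 n hn ih =>
    unfold pvBinStr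
    simp only [hn, dite_false, List.length_append, List.length_cons, List.length_nil]
    obtain ⟨v, rfl⟩ : ∃ v, w = v + 1 := ⟨w - 1, by omega⟩
    have h2 : (2:Nat) ^ (v + 1) = 2 * 2 ^ v := by ring
    have hv : 1 ≤ v := by
      rcases Nat.eq_zero_or_pos v with rfl | hpos
      · rw [h2] at h; norm_num at h; omega
      · omega
    have hlt : n / 2 < 2 ^ v := by rw [h2] at h; omega
    have := ih v hlt hv
    omega

lemma pvBinStr_bits (n : Nat) :
    (pvBinStr n).map pvDigit = pvBits (pvBinStr n).length n := by
  induction n using pvBinStr.induct with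
  | case1 n h =>
    unfold pvBinStr
    simp only [h, dite_true, List.map_cons, List.map_nil, List.length_cons, List.length_nil]
    have hn01 : n = 0 ∨ n = 1 := by omega
    rcases hn01 with rfl | rfl <;> decide
  | case2 n h ih =>
    unfold pvBinStr
    simp only [h, dite_false, List.map_append, List.map_cons, List.map_nil,
      List.length_append, List.length_cons, List.length_nil]
    rw [ih]
    have hd : pvDigit (if n % 2 = 1 then '1' else '0') = ((n % 2 : Nat) : Int) := by
      rcases Nat.mod_two_eq_zero_or_one n with h2 | h2 <;> rw [h2] <;> decide
    rw [hd]
    rfl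

lemma pvDigit_zero : pvDigit '0' = 0 := by decide

-- horner value of the byte list is < 2^(8·len), and its 8·len-bit window is the
-- concatenation of the per-byte 8-bit windows
lemma pvHorner_lt (data : List Nat) (h : ∀ b ∈ data, b < 256) :
    data.foldl (fun a b => 256 * a + b) 0 < 2 ^ (8 * data.length) := by
  induction data using List.reverseRecOn with
  | nil => simp
  | append_singleton xs b ih =>
    simp only [List.foldl_append, List.foldl_cons, List.foldl_nil, List.length_append,
      List.length_cons, List.length_nil]
    have hb : b < 256 := h b (by simp)
    have hxs := ih (fun x hx => h x (by simp [hx]))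
    have : 2 ^ (8 * (xs.length + 1)) = 2 ^ (8 * xs.length) * 256 := by ring
    rw [this]
    set H := xs.foldl (fun a b => 256 * a + b) 0
    nlinarith

lemma pvHorner_bits (data : List Nat) (h : ∀ b ∈ data, b < 256) :
    pvBits (8 * data.length) (data.foldl (fun a b => 256 * a + b) 0)
      = data.flatMap (pvBits 8) := by
  induction data using List.reverseRecOn with
  | nil => simp [pvBits]
  | append_singleton xs b ih =>
    simp only [List.foldl_append, List.foldl_cons, List.foldl_nil, List.length_append,
      List.length_cons, List.length_nil, List.flatMap_append, List.flatMap_cons,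
      List.flatMap_nil, List.append_nil]
    have hb : b < 256 := h b (by simp)
    have h8 : 8 * (xs.length + 1) = 8 * xs.length + 8 := by ring
    rw [h8]
    have := pvBits_chunk 8 (8 * xs.length) (xs.foldl (fun a b => 256 * a + b) 0) b
      (by norm_num [hb])
    norm_num at this
    rw [this, ih (fun x hx => h x (by simp [hx]))]

lemma flatMap_len8 (l : List Char) :
    (l.flatMap (fun c => pvBits 8 c.toNat)).length = 8 * l.length := by
  induction l with
  | nil => simp
  | cons c l ih => simp [List.flatMap_cons, pvBits_length, ih]; ring

-- A, reduced to the per-character windows plus the tail padding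
lemma StrToMsg_closed (msg : String) (hdom : Dom_StrToMsg msg) :
    StrToMsg msg = msg.toList.flatMap (fun c => pvBits 8 c.toNat)
      ++ List.replicate (msg.length ^ 2 - 8 * msg.toList.length) (0 : Int) := by
  have hall : ∀ c ∈ msg.toList, pvDomChar c = true := fun c hc => List.all_eq_true.mp hdom c hc
  unfold StrToMsg
  rw [bodyA_eq, PySem.List.foldl_append_eq_flatMap, List.nil_append]
  have hflat : msg.toList.flatMap (fun c => pvGA c.toNat)
      = msg.toList.flatMap (fun c => pvBits 8 c.toNat) := by
    apply List.flatMap_congr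
    intro c hc
    exact pvG_eq c.toNat (charCode_lt c (hall c hc))
  rw [hflat]
  show msg.toList.flatMap (fun c => pvBits 8 c.toNat)
        ++ List.replicate (((msg.length : Int) ^ 2
            - ((msg.toList.flatMap (fun c => pvBits 8 c.toNat)).length : Int)).toNat) (0 : Int)
      = _
  congr 1
  rw [flatMap_len8]
  have hlen : msg.length = msg.toList.length := rfl
  rw [hlen]
  congr 1
  have hcast : ((msg.toList.length ^ 2 : Nat) : Int) = (msg.toList.length : Int) ^ 2 := by
    push_cast; ring
  rw [← hcast]
  omega

-- ===== VERDICT (by name: the statement is the Claim_ definition above) =====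
theorem StrToMsg_spec : Claim_equal_StrToMsg := by
  intro msg hdom
  unfold Spec_StrToMsg
  rw [StrToMsg_closed msg hdom]
  simp only [StrToMsg_alt]
  have hall : ∀ c ∈ msg.toList, pvDomChar c = true := fun c hc => List.all_eq_true.mp hdom c hc
  have hlen : msg.length = msg.toList.length := rfl
  by_cases hnil : msg.toList = []
  · simp [hnil, hlen]
  · have hbytes : ∀ b ∈ msg.toList.map Char.toNat, b < 256 := by
      intro b hb
      obtain ⟨c, hc, rfl⟩ := List.mem_map.mp hb
      have := charCode_lt c (hall c hc)
      omega
    have hDnil : ¬ (msg.toList.map Char.toNat = []) := by simp [hnil]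
    rw [if_neg hDnil]
    set data := msg.toList.map Char.toNat with hdata
    set n := data.foldl (fun a b => 256 * a + b) 0 with hn
    set bin := pvBinStr n with hbin
    have hL : data.length = msg.toList.length := by rw [hdata]; simp
    have hnlt : n < 2 ^ (8 * data.length) := pvHorner_lt data hbytes
    have hL1 : 1 ≤ data.length := by
      rw [hL]
      have := List.length_pos_of_ne_nil hnil
      omega
    have hble : bin.length ≤ 8 * data.length := pvBinStr_le n _ hnlt (by omega)
    have hnbin : n < 2 ^ bin.length := pvBinStr_lt n
    have hfun : (fun b => (PySem.Int.ofChars? [b]).getD 0) = pvDigit := rfl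
    rw [hfun, List.map_append, List.map_replicate, pvDigit_zero]
    have hbody : (List.replicate (8 * data.length - bin.length) '0' ++ bin).map pvDigit
        = pvBits (8 * data.length) n := by
      have hbits : bin.map pvDigit = pvBits bin.length n := pvBinStr_bits n
      have hpad := pvBits_pad (8 * data.length - bin.length) bin.length n hnbin
      rw [Nat.sub_add_cancel hble] at hpad
      rw [List.map_append, List.map_replicate, pvDigit_zero, hbits, ← hpad]
    rw [hbody]
    have hflat2 : pvBits (8 * data.length) n = msg.toList.flatMap (fun c => pvBits 8 c.toNat) := by
      rw [hn, pvHorner_bits data hbytes, hdata, List.flatMap_map]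
    rw [hflat2]
    congr 1
    have hblen : (List.replicate (8 * data.length - bin.length) '0' ++ bin).length
        = 8 * data.length := by
      simp [List.length_append, List.length_replicate]
      omega
    rw [hblen, hlen, hL]
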